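-- pv_equiv track=rewrite | github.com/Zek21/ScreenMemory | tools/skynet_collective_dashboard.py | render_bottlenecks
-- ===== SOURCE A (Python) =====
-- WIDTH = 80
--
-- BOX_SEP = "├" + "─" * (WIDTH - 2) + "┤"
--
-- def _pad(text, width=WIDTH - 4):
--     """Pad text to fit inside box lines."""
--     if len(text) > width:
--         text = text[:width - 1] + "…"
--     return text.ljust(width)
--
-- def _box_line(text):
--     """Wrap text in box borders: │ text │"""
--     return "│ " + _pad(text) + " │"
--
-- def render_bottlenecks(data):
--     """Render known bottlenecks."""
--     evo = data.get("evolution", {})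
--     bottlenecks = evo.get("bottlenecks", [])
--     lines = []
--     lines.append(_box_line("  ⚠  BOTTLENECKS"))
--     lines.append(_box_line(""))
--
--     if not bottlenecks:
--         lines.append(_box_line("    No bottlenecks detected"))
--     else:
--         # Show top 6 by severity
--         sev_order = {"high": 0, "medium": 1, "low": 2}
--         sorted_bn = sorted(bottlenecks, key=lambda b: sev_order.get(b.get("severity", "low"), 3))
--         for bn in sorted_bn[:6]:
--             sev = bn.get("severity", "?").upper()
--             desc = bn.get("description", "unknown")
--             icon = {"HIGH": "🔴", "MEDIUM": "🟡", "LOW": "🟢"}.get(sev, "⚪")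
--             line_text = f"    {icon} [{sev:<6}] {desc}"
--             if len(line_text) > WIDTH - 4:
--                 line_text = line_text[:WIDTH - 5] + "…"
--             lines.append(_box_line(line_text))
--         if len(bottlenecks) > 6:
--             lines.append(_box_line(f"    ... and {len(bottlenecks) - 6} more"))
--
--     lines.append(BOX_SEP)
--     return lines
-- ===== SOURCE B (Python) =====
-- WIDTH = 80
--
-- BOX_SEP = "├" + "─" * (WIDTH - 2) + "┤"
--
-- def _pad(text, width=WIDTH - 4):
--     if len(text) > width:
--         text = text[:width - 1] + "…"
--     return text.ljust(width)
--
-- def _box_line(text):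
--     return "│ " + _pad(text) + " │"
--
-- def _bn_text(bn):
--     sev = bn.get("severity", "?").upper()
--     desc = bn.get("description", "unknown")
--     icon = {"HIGH": "🔴", "MEDIUM": "🟡", "LOW": "🟢"}.get(sev, "⚪")
--     t = f"    {icon} [{sev:<6}] {desc}"
--     return t[:WIDTH - 5] + "…" if len(t) > WIDTH - 4 else t
--
-- def render_bottlenecks(data):
--     """Render known bottlenecks (stable bucket partition instead of sorted())."""
--     evo = data.get("evolution", {})
--     bottlenecks = evo.get("bottlenecks", [])
--     lines = [_box_line("  ⚠  BOTTLENECKS"), _box_line("")]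
--     if not bottlenecks:
--         lines.append(_box_line("    No bottlenecks detected"))
--     else:
--         high, med, low, other = [], [], [], []
--         for bn in bottlenecks:
--             s = bn.get("severity", "low")
--             bucket = high if s == "high" else med if s == "medium" else low if s == "low" else other
--             bucket.append(bn)
--         ordered = high + med + low + other
--         lines.extend(_box_line(_bn_text(bn)) for bn in ordered[:6])
--         if len(bottlenecks) > 6:
--             lines.append(_box_line(f"    ... and {len(bottlenecks) - 6} more"))
--     lines.append(BOX_SEP)
--     return lines
-- ===== Notes on version B (the rewrite author's own statement) =====
-- stated objective: alternative
-- what changed: Replaces sorted() with a severity-key comparator by a single-pass stable partition into four ordered buckets (high/medium/low/other) concatenated in order, then renders the first 6.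
import Mathlib
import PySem

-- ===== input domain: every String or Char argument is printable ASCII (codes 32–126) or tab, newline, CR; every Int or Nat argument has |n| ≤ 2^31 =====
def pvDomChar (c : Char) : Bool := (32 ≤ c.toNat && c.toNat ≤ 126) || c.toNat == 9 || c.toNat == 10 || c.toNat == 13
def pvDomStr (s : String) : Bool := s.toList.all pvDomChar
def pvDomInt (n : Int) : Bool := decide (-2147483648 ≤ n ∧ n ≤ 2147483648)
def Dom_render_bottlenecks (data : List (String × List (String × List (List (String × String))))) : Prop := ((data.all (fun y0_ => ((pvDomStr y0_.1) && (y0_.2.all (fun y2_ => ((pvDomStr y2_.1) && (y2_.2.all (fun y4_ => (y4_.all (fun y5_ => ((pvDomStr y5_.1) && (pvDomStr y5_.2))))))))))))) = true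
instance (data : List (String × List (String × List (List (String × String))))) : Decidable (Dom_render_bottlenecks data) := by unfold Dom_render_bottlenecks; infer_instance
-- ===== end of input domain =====

-- B replaces A's sorted() by a one-pass stable bucket partition (high/medium/low/other); same return value, objective: alternative.

-- ===== PORT A =====
-- shared rendering helpers (_pad, _box_line and the per-bottleneck f-string, used verbatim by both Pythons)
def pvPad (t : List Char) : List Char :=
  let t' := if 76 < t.length then t.take 75 ++ ['…'] else t
  t' ++ List.replicate (76 - t'.length) ' '

def pvBoxLine (t : List Char) : String :=
  String.ofList ('│' :: ' ' :: (pvPad t ++ [' ', '│']))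

def pvBoxSep : String := String.ofList ('├' :: (List.replicate 78 '─' ++ ['┤']))

-- f"    {icon} [{sev:<6}] {desc}" with the WIDTH-4 truncation of A's loop body
def pvBnText (bn : List (String × String)) : List Char :=
  let sev := PySem.Chars.upper (PySem.Dict.getD ⟨bn⟩ "severity" "?").toList
  let desc := (PySem.Dict.getD ⟨bn⟩ "description" "unknown").toList
  let icon : List Char :=
    if sev = "HIGH".toList then "🔴".toList
    else if sev = "MEDIUM".toList then "🟡".toList
    else if sev = "LOW".toList then "🟢".toList
    else "⚪".toList
  let t := "    ".toList ++ icon ++ " [".toList ++ (sev ++ List.replicate (6 - sev.length) ' ') ++ "] ".toList ++ desc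
  if 76 < t.length then t.take 75 ++ ['…'] else t

-- sev_order.get(b.get("severity", "low"), 3) (literal dict lookup as the if-chain it denotes)
def pvSevKey (bn : List (String × String)) : Int :=
  if PySem.Dict.getD ⟨bn⟩ "severity" "low" = "high" then 0
  else if PySem.Dict.getD ⟨bn⟩ "severity" "low" = "medium" then 1
  else if PySem.Dict.getD ⟨bn⟩ "severity" "low" = "low" then 2 else 3

def render_bottlenecks (data : List (String × List (String × List (List (String × String))))) : List String :=
  let evo := PySem.Dict.getD ⟨data⟩ "evolution" []
  let bottlenecks := PySem.Dict.getD ⟨evo⟩ "bottlenecks" []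
  let lines : List String := [pvBoxLine "  ⚠  BOTTLENECKS".toList, pvBoxLine []]
  let lines :=
    if bottlenecks = [] then
      lines ++ [pvBoxLine "    No bottlenecks detected".toList]
    else
      let sorted_bn := PySem.List.sorted bottlenecks pvSevKey
      let lines := (PySem.List.slice sorted_bn none (some 6)).foldl
        (fun acc bn => acc ++ [pvBoxLine (pvBnText bn)]) lines
      if 6 < PySem.List.len bottlenecks then
        lines ++ [pvBoxLine ("    ... and ".toList ++ (PySem.Int.toStr (PySem.List.len bottlenecks - 6)).toList ++ " more".toList)]
      else lines
  lines ++ [pvBoxSep]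

-- ===== PORT B =====
def pvBucketStep
    (st : List (List (String × String)) × List (List (String × String)) × List (List (String × String)) × List (List (String × String)))
    (bn : List (String × String)) :
    List (List (String × String)) × List (List (String × String)) × List (List (String × String)) × List (List (String × String)) :=
  if PySem.Dict.getD ⟨bn⟩ "severity" "low" = "high" then (st.1 ++ [bn], st.2.1, st.2.2.1, st.2.2.2)
  else if PySem.Dict.getD ⟨bn⟩ "severity" "low" = "medium" then (st.1, st.2.1 ++ [bn], st.2.2.1, st.2.2.2)
  else if PySem.Dict.getD ⟨bn⟩ "severity" "low" = "low" then (st.1, st.2.1, st.2.2.1 ++ [bn], st.2.2.2)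
  else (st.1, st.2.1, st.2.2.1, st.2.2.2 ++ [bn])

def render_bottlenecks_alt (data : List (String × List (String × List (List (String × String))))) : List String :=
  let evo := PySem.Dict.getD ⟨data⟩ "evolution" []
  let bottlenecks := PySem.Dict.getD ⟨evo⟩ "bottlenecks" []
  let lines : List String := [pvBoxLine "  ⚠  BOTTLENECKS".toList, pvBoxLine []]
  let lines :=
    if bottlenecks = [] then
      lines ++ [pvBoxLine "    No bottlenecks detected".toList]
    else
      let st := bottlenecks.foldl pvBucketStep ([], [], [], [])
      let ordered := st.1 ++ st.2.1 ++ st.2.2.1 ++ st.2.2.2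
      let lines := lines ++ (ordered.take 6).map (fun bn => pvBoxLine (pvBnText bn))
      if 6 < PySem.List.len bottlenecks then
        lines ++ [pvBoxLine ("    ... and ".toList ++ (PySem.Int.toStr (PySem.List.len bottlenecks - 6)).toList ++ " more".toList)]
      else lines
  lines ++ [pvBoxSep]

-- ===== PRECONDITION & SPEC =====
def Spec_render_bottlenecks (data : List (String × List (String × List (List (String × String))))) (out : List String) : Prop := out = render_bottlenecks_alt data
instance (data : List (String × List (String × List (List (String × String))))) (out : List String) : Decidable (Spec_render_bottlenecks data out) := by unfold Spec_render_bottlenecks; infer_instance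

-- ===== CLAIM (what is proved, stated in full; the proofs are below) =====
def Claim_equal_render_bottlenecks : Prop := ∀ (data : List (String × List (String × List (List (String × String))))), Dom_render_bottlenecks data → Spec_render_bottlenecks data (render_bottlenecks data)

-- ===== LEMMAS AND PROOFS =====

lemma insertBy_append_not {α : Type} (before : α → α → Bool) (x : α) (as bs : List α)
    (h : ∀ y ∈ as, before x y = false) :
    PySem.List.insertBy before x (as ++ bs) = as ++ PySem.List.insertBy before x bs := by
  induction as with
  | nil => rfl
  | cons a t ih =>
    simp only [List.cons_append, PySem.List.insertBy]
    rw [h a (by simp)]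
    simp only [Bool.false_eq_true, if_false]
    rw [ih (fun y hy => h y (by simp [hy]))]

lemma insertBy_all_before {α : Type} (before : α → α → Bool) (x : α) (bs : List α)
    (h : ∀ y ∈ bs, before x y = true) :
    PySem.List.insertBy before x bs = x :: bs := by
  cases bs with
  | nil => rfl
  | cons b t =>
    simp only [PySem.List.insertBy]
    rw [h b (by simp)]
    simp

-- stable insertion sort with a {0,1,2,3}-valued key is the four key-buckets in order
lemma foldl_insertBy_buckets {α : Type} (key : α → Int)
    (hk : ∀ x : α, key x = 0 ∨ key x = 1 ∨ key x = 2 ∨ key x = 3) :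
    ∀ (xs c0 c1 c2 c3 : List α),
      (∀ y ∈ c0, key y = 0) → (∀ y ∈ c1, key y = 1) → (∀ y ∈ c2, key y = 2) → (∀ y ∈ c3, key y = 3) →
      xs.foldl (fun acc x => PySem.List.insertBy (fun a b => decide (key a < key b)) x acc)
          (c0 ++ c1 ++ c2 ++ c3)
        = (c0 ++ xs.filter (fun x => key x == 0)) ++ (c1 ++ xs.filter (fun x => key x == 1))
          ++ (c2 ++ xs.filter (fun x => key x == 2)) ++ (c3 ++ xs.filter (fun x => key x == 3)) := by
  intro xs
  induction xs with
  | nil => intro c0 c1 c2 c3 _ _ _ _; simp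
  | cons x t ih =>
    intro c0 c1 c2 c3 h0 h1 h2 h3
    simp only [List.foldl_cons]
    rcases hk x with hx | hx | hx | hx
    · have e : PySem.List.insertBy (fun a b => decide (key a < key b)) x (c0 ++ c1 ++ c2 ++ c3)
          = (c0 ++ [x]) ++ c1 ++ c2 ++ c3 := by
        rw [List.append_assoc, List.append_assoc,
          insertBy_append_not _ _ c0 _ (fun y hy => by simp [h0 y hy, hx]),
          insertBy_all_before _ _ _ (fun y hy => by
            rcases List.mem_append.1 hy with hy | hy
            · simp [h1 y hy, hx]
            · rcases List.mem_append.1 hy with hy | hy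
              · simp [h2 y hy, hx]
              · simp [h3 y hy, hx])]
        simp
      rw [e, ih (c0 ++ [x]) c1 c2 c3
        (by intro y hy; rcases List.mem_append.1 hy with hy | hy
            · exact h0 y hy
            · simp at hy; simpa [hy] using hx) h1 h2 h3]
      simp [hx]
    · have e : PySem.List.insertBy (fun a b => decide (key a < key b)) x (c0 ++ c1 ++ c2 ++ c3)
          = c0 ++ (c1 ++ [x]) ++ c2 ++ c3 := by
        rw [List.append_assoc, List.append_assoc,
          insertBy_append_not _ _ c0 _ (fun y hy => by simp [h0 y hy, hx]),
          insertBy_append_not _ _ c1 _ (fun y hy => by simp [h1 y hy, hx]),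
          insertBy_all_before _ _ _ (fun y hy => by
            rcases List.mem_append.1 hy with hy | hy
            · simp [h2 y hy, hx]
            · simp [h3 y hy, hx])]
        simp
      rw [e, ih c0 (c1 ++ [x]) c2 c3 h0
        (by intro y hy; rcases List.mem_append.1 hy with hy | hy
            · exact h1 y hy
            · simp at hy; simpa [hy] using hx) h2 h3]
      simp [hx]
    · have e : PySem.List.insertBy (fun a b => decide (key a < key b)) x (c0 ++ c1 ++ c2 ++ c3)
          = c0 ++ c1 ++ (c2 ++ [x]) ++ c3 := by
        rw [List.append_assoc, List.append_assoc,
          insertBy_append_not _ _ c0 _ (fun y hy => by simp [h0 y hy, hx]),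
          insertBy_append_not _ _ c1 _ (fun y hy => by simp [h1 y hy, hx]),
          insertBy_append_not _ _ c2 _ (fun y hy => by simp [h2 y hy, hx]),
          insertBy_all_before _ _ _ (fun y hy => by simp [h3 y hy, hx])]
        simp
      rw [e, ih c0 c1 (c2 ++ [x]) c3 h0 h1
        (by intro y hy; rcases List.mem_append.1 hy with hy | hy
            · exact h2 y hy
            · simp at hy; simpa [hy] using hx) h3]
      simp [hx]
    · have e : PySem.List.insertBy (fun a b => decide (key a < key b)) x (c0 ++ c1 ++ c2 ++ c3)
          = c0 ++ c1 ++ c2 ++ (c3 ++ [x]) := by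
        rw [List.append_assoc, List.append_assoc,
          insertBy_append_not _ _ c0 _ (fun y hy => by simp [h0 y hy, hx]),
          insertBy_append_not _ _ c1 _ (fun y hy => by simp [h1 y hy, hx]),
          insertBy_append_not _ _ c2 _ (fun y hy => by simp [h2 y hy, hx]),
          PySem.List.insertBy_of_forall_not_before _ _ _ (fun y hy => by simp [h3 y hy, hx])]
        simp
      rw [e, ih c0 c1 c2 (c3 ++ [x]) h0 h1 h2
        (by intro y hy; rcases List.mem_append.1 hy with hy | hy
            · exact h3 y hy
            · simp at hy; simpa [hy] using hx)]
      simp [hx]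

lemma sorted_pvSevKey (xs : List (List (String × String))) :
    PySem.List.sorted xs pvSevKey
      = xs.filter (fun x => pvSevKey x == 0) ++ xs.filter (fun x => pvSevKey x == 1)
        ++ xs.filter (fun x => pvSevKey x == 2) ++ xs.filter (fun x => pvSevKey x == 3) := by
  rw [PySem.List.sorted_eq_foldl_insertBy]
  have := foldl_insertBy_buckets pvSevKey
    (by intro x; unfold pvSevKey; split_ifs <;> simp) xs [] [] [] []
    (by simp) (by simp) (by simp) (by simp)
  simpa using this

lemma bucket_foldl_eq (xs : List (List (String × String))) :
    xs.foldl pvBucketStep ([], [], [], [])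
      = (xs.filter (fun x => pvSevKey x == 0), xs.filter (fun x => pvSevKey x == 1),
         xs.filter (fun x => pvSevKey x == 2), xs.filter (fun x => pvSevKey x == 3)) := by
  have main : ∀ (xs : List (List (String × String))) (c0 c1 c2 c3 : List (List (String × String))),
      xs.foldl pvBucketStep (c0, c1, c2, c3)
        = (c0 ++ xs.filter (fun x => pvSevKey x == 0), c1 ++ xs.filter (fun x => pvSevKey x == 1),
           c2 ++ xs.filter (fun x => pvSevKey x == 2), c3 ++ xs.filter (fun x => pvSevKey x == 3)) := by
    intro xs
    induction xs with
    | nil => intro c0 c1 c2 c3; simp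
    | cons x t ih =>
      intro c0 c1 c2 c3
      simp only [List.foldl_cons]
      by_cases h0 : PySem.Dict.getD ⟨x⟩ "severity" "low" = "high"
      · rw [show pvBucketStep (c0, c1, c2, c3) x = (c0 ++ [x], c1, c2, c3) by
          simp [pvBucketStep, h0], ih]
        simp [pvSevKey, h0]
      · by_cases h1 : PySem.Dict.getD ⟨x⟩ "severity" "low" = "medium"
        · rw [show pvBucketStep (c0, c1, c2, c3) x = (c0, c1 ++ [x], c2, c3) by
            simp [pvBucketStep, h1], ih]
          simp [pvSevKey, h1]

        · by_cases h2 : PySem.Dict.getD ⟨x⟩ "severity" "low" = "low"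
          · rw [show pvBucketStep (c0, c1, c2, c3) x = (c0, c1, c2 ++ [x], c3) by
              simp [pvBucketStep, h2], ih]
            simp [pvSevKey, h2]
          · rw [show pvBucketStep (c0, c1, c2, c3) x = (c0, c1, c2, c3 ++ [x]) by
              simp [pvBucketStep, h0, h1, h2], ih]
            simp [pvSevKey, h0, h1, h2]
  simpa using main xs [] [] [] []

lemma foldl_append_singleton {α β : Type} (f : α → β) (xs : List α) (acc : List β) :
    xs.foldl (fun acc x => acc ++ [f x]) acc = acc ++ xs.map f := by
  induction xs generalizing acc with
  | nil => simp
  | cons x t ih => simp [ih]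

-- ===== VERDICT (by name: the statement is the Claim_ definition above) =====
theorem render_bottlenecks_spec : Claim_equal_render_bottlenecks := by
  intro data _
  unfold Spec_render_bottlenecks render_bottlenecks render_bottlenecks_alt
  by_cases hb : PySem.Dict.getD ⟨PySem.Dict.getD ⟨data⟩ "evolution" []⟩ "bottlenecks" [] = []
  · simp [hb]
  · simp only [if_neg hb]
    rw [PySem.List.slice_to _ (by norm_num), foldl_append_singleton, sorted_pvSevKey,
      bucket_foldl_eq]
    have h6 : (6 : Int).toNat = 6 := rfl
    norm_num [h6]
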